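-- pv_equiv track=rewrite | github.com/2manydoritos/SSHD_APWorld | setting_string_decoder.py | _calculate_bits_needed
-- ===== SOURCE A (Python) =====
-- def _calculate_bits_needed(option_count: int) -> int:
--     """Calculate number of bits needed to represent option_count values."""
--     if option_count <= 1:
--         return 0
--     bits = 0
--     value = option_count - 1
--     while value > 0:
--         bits += 1
--         value >>= 1
--     return bits
-- ===== SOURCE B (Python) =====
-- def _calculate_bits_needed(option_count: int) -> int:
--     """Calculate number of bits needed to represent option_count values."""
--     if option_count <= 1:
--         return 0
--     return (option_count - 1).bit_length()
-- ===== Notes on version B (the rewrite author's own statement) =====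
-- stated objective: idiomatic
-- what changed: Replaces the shift-and-count while loop with a closed-form call to int.bit_length, keeping the degenerate guard for non-positive/unit counts.
import Mathlib
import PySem

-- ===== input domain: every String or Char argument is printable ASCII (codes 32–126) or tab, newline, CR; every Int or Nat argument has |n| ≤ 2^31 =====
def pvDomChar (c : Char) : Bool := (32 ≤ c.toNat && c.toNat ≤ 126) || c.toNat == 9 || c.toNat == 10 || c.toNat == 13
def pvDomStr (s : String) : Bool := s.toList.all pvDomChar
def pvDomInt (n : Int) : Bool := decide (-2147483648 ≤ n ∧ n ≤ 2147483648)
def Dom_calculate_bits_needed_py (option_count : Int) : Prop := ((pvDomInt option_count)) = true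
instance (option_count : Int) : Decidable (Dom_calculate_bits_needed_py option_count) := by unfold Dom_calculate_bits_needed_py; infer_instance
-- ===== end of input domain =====

-- B replaces A's shift-and-count loop with the closed-form bit_length builtin (more idiomatic).


-- ===== PORT A =====
-- the 'while value > 0: bits += 1; value >>= 1' loop (>> 1 on ints is floor division by 2)
def pvLoopA (bits value : Int) : Int :=
  if h : value > 0 then
    pvLoopA (bits + 1) (PySem.Int.floordiv value 2)
  else bits
termination_by value.toNat
decreasing_by
  have : PySem.Int.floordiv value 2 = value / 2 := PySem.Int.floordiv_eq_ediv_of_pos (by omega)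
  rw [this]; omega

def calculate_bits_needed_py (option_count : Int) : Int :=
  if option_count ≤ 1 then 0
  else pvLoopA 0 (option_count - 1)

-- ===== PORT B =====
def calculate_bits_needed_py_alt (option_count : Int) : Int :=
  if option_count ≤ 1 then 0
  else (PySem.Int.bitLength (option_count - 1) : Int)

-- ===== PRECONDITION & SPEC =====
def Spec_calculate_bits_needed_py (option_count : Int) (out : Int) : Prop := out = calculate_bits_needed_py_alt option_count
instance (option_count : Int) (out : Int) : Decidable (Spec_calculate_bits_needed_py option_count out) := by unfold Spec_calculate_bits_needed_py; infer_instance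

-- ===== CLAIM (what is proved, stated in full; the proofs are below) =====
def Claim_equal_calculate_bits_needed_py : Prop := ∀ (option_count : Int), Dom_calculate_bits_needed_py option_count → Spec_calculate_bits_needed_py option_count (calculate_bits_needed_py option_count)

-- ===== LEMMAS AND PROOFS =====
lemma pvLoopA_eq (n : Nat) :
    ∀ bits : Int, pvLoopA bits (n : Int) = bits + (PySem.Int.bitLength (n : Int) : Int) := by
  induction n using Nat.strong_induction_on with
  | _ n ih =>
    intro bits
    rw [pvLoopA]
    by_cases h : (n : Int) > 0
    · have hn : 0 < n := by omega
      have hfd : PySem.Int.floordiv (n : Int) 2 = ((n / 2 : Nat) : Int) := by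
        exact_mod_cast PySem.Int.floordiv_natCast n 2
      rw [dif_pos h, hfd,
        ih (n / 2) (Nat.div_lt_self hn (by omega)) (bits + 1),
        PySem.Int.bitLength_natCast hn]
      push_cast; ring
    · have hv0 : n = 0 := by omega
      subst hv0
      simp [PySem.Int.bitLength_zero]

theorem calculate_bits_needed_py_spec : Claim_equal_calculate_bits_needed_py := by
  intro oc _
  unfold Spec_calculate_bits_needed_py calculate_bits_needed_py calculate_bits_needed_py_alt
  by_cases h : oc ≤ 1
  · simp [h]
  · have hcast : oc - 1 = ((oc - 1).toNat : Int) := by omega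
    rw [if_neg h, if_neg h, hcast, pvLoopA_eq (oc - 1).toNat 0, zero_add]

-- ===== VERDICT (by name: the statement is the Claim_ definition above) =====
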